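-- pv_equiv track=rewrite | github.com/joannewolf/code_problems | leetcode/String/2182_Construct_String_With_Repeat_Limit.py | repeatLimitedString
-- ===== SOURCE A (Python) =====
-- def repeatLimitedString(s, repeatLimit):
--     """
--     :type s: str
--     :type repeatLimit: int
--     :rtype: str
--     """
--     ascii_a = ord('a')
--     result = ""
--     char_count = [0] * 26
--     for char in s:
--         char_count[ord(char) - ascii_a] += 1
--
--     current = 25 # start from 'z'
--     next = 24
--     while current >= 0:
--         if char_count[current] == 0:
--             current -= 1
--         elif char_count[current] <= repeatLimit:
--             result += chr(ascii_a + current) * char_count[current]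
--             char_count[current] = 0
--             current -= 1
--         else:
--             result += chr(ascii_a + current) * repeatLimit
--             char_count[current] -= repeatLimit
--             next = current - 1
--             while next >= 0:
--                 if char_count[next] == 0:
--                     next -= 1
--                 else:
--                     result += chr(ascii_a + next)
--                     char_count[next] -= 1
--                     break
--             if next == -1:
--                 return result
--
--     return result
-- ===== SOURCE B (Python) =====
-- def repeatLimitedString(s, repeatLimit):
--     counts = [0] * 26
--     for ch in s:
--         counts[ord(ch) - 97] += 1
--     # descending runs of (letter, multiplicity)
--     runs = [(chr(97 + i), counts[i]) for i in range(26) if counts[i] > 0][::-1]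
--     out = []
--     while runs:
--         c, n = runs[0]
--         if n <= repeatLimit:
--             out.append(c * n)
--             runs[0:1] = []
--         elif len(runs) == 1:
--             out.append(c * repeatLimit)
--             break
--         else:
--             d, m = runs[1]
--             # in closed form: 'need' separators finish the whole run of c
--             need = -(-n // repeatLimit) - 1
--             if m > need:
--                 out.append((c * repeatLimit + d) * need + c * (n - need * repeatLimit))
--                 runs[0:2] = [(d, m - need)]
--             else:
--                 out.append((c * repeatLimit + d) * m)
--                 runs[0:2] = [(c, n - m * repeatLimit)]
--     return "".join(out)
-- ===== Notes on version B (the rewrite author's own statement) =====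
-- stated objective: alternative
-- what changed: Instead of A's per-block greedy that emits one repeatLimit-block at a time and rescans the 26-counter array downward for every single separator character, B compresses the string once into a descending list of (letter, count) runs and, per adjacent pair of runs, computes in closed form with ceiling division how many block+separator groups to emit in one batch. …
-- outside the precondition, e.g. on repeatLimitedString('ab', 0): A returns 'a', B raises ZeroDivisionError; on repeatLimitedString('ab', -1): A returns 'a', B returns ''
import Mathlib
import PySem

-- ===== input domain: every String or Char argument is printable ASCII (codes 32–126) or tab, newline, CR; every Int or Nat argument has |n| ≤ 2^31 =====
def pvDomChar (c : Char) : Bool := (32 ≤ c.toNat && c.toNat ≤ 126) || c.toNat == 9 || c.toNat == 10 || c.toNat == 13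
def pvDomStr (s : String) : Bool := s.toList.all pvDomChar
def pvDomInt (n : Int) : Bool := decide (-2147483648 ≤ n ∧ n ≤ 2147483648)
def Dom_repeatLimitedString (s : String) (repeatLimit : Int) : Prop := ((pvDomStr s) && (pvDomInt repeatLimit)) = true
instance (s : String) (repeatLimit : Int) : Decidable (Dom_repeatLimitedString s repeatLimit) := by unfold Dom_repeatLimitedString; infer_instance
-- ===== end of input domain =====

-- B replaces A's per-block greedy (which rescans the 26-counter array for every single
-- separator) by a run-compressed list consumed pairwise, emitting whole block+separator
-- groups computed in closed form by ceiling division (objective: alternative).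


-- ===== PORT A =====
-- char_count[i] += 1 with Python's negative-index wraparound; pySet? = none is IndexError
-- (those inputs are excluded by Pre_): the port then leaves the list unchanged.
def pvBump (cc : List Int) (i : Int) : List Int :=
  match PySem.List.pySet? cc i (PySem.List.pyGetD cc i 0 + 1) with
  | some cc' => cc'
  | none => cc

-- the counting loop both Pythons share verbatim: char_count = [0]*26; for char in s: …
def pvHist (s : String) : List Int :=
  s.toList.foldl (fun cc ch => pvBump cc ((ch.toNat : Int) - 97)) (List.replicate 26 0)

-- A's inner while: scan next = n, n-1, … for a nonzero bucket; -1 when none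
-- (indices reached by A are in range, so the total pyGetD with default 0 is exact)
def pvScanA (cc : List Int) (n : Int) : Int :=
  if n < 0 then -1
  else if PySem.List.pyGetD cc n 0 = 0 then pvScanA cc (n - 1) else n
termination_by (n + 1).toNat
decreasing_by omega

-- A's outer while, fuel-guarded (the fuel passed by repeatLimitedString is proved sufficient
-- inside Pre_ by the lemmas below); acc is the result string as its char list
def pvLoopA (rl : Int) : Nat → List Int → Int → List Char → List Char
  | 0, _, _, acc => acc
  | fuel + 1, cc, cur, acc =>
    if cur < 0 then acc
    else
      let c := PySem.List.pyGetD cc cur 0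
      if c = 0 then pvLoopA rl fuel cc (cur - 1) acc
      else if c ≤ rl then
        pvLoopA rl fuel (PySem.List.pySetD cc cur 0) (cur - 1)
          (acc ++ List.replicate c.toNat (Char.ofNat (97 + cur).toNat))
      else
        let acc' := acc ++ List.replicate rl.toNat (Char.ofNat (97 + cur).toNat)
        let cc' := PySem.List.pySetD cc cur (c - rl)
        let nx := pvScanA cc' (cur - 1)
        if nx = -1 then acc'
        else pvLoopA rl fuel (PySem.List.pySetD cc' nx (PySem.List.pyGetD cc' nx 0 - 1)) cur
          (acc' ++ [Char.ofNat (97 + nx).toNat])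

def repeatLimitedString (s : String) (repeatLimit : Int) : String :=
  let cc := pvHist s
  String.ofList (pvLoopA repeatLimit ((cc.map Int.toNat).sum * 27 + 27) cc 25 [])

-- ===== PORT B =====
-- Source B's runs = [(chr(97+i), counts[i]) for i in range(26) if counts[i] > 0][::-1]
-- (letters kept as their Int index, turned into the Char when emitted);
-- indices are in range(26) = the counter's length, so plain .getD is exact
def pvStackInit (cc : List Int) : List (Int × Int) :=
  (((List.range 26).filter (fun (i : Nat) => 0 < cc.getD i 0)).map
    (fun (i : Nat) => ((i : Int), cc.getD i 0))).reverse

-- Source B's while loop: every iteration replaces the first one or two runs by one run, so the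
-- list length strictly decreases (structural recursion, no fuel); out is the joined list
def pvLoopC (rl : Int) (runs : List (Int × Int)) (out : List (List Char)) : List (List Char) :=
  match runs with
  | [] => out
  | (i, n) :: rest =>
    if n ≤ rl then
      pvLoopC rl rest (out ++ [List.replicate n.toNat (Char.ofNat (97 + i).toNat)])
    else
      match rest with
      | [] => out ++ [List.replicate rl.toNat (Char.ofNat (97 + i).toNat)]
      | (j, m) :: rest2 =>
        -- need = -(-n // repeatLimit) - 1, Python's floor division
        let need := -(PySem.Int.floordiv (-n) rl) - 1
        if need < m then
          pvLoopC rl ((j, m - need) :: rest2)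
            (out ++ [(List.replicate need.toNat
                (List.replicate rl.toNat (Char.ofNat (97 + i).toNat)
                  ++ [Char.ofNat (97 + j).toNat])).flatten
              ++ List.replicate (n - need * rl).toNat (Char.ofNat (97 + i).toNat)])
        else
          pvLoopC rl ((i, n - m * rl) :: rest2)
            (out ++ [(List.replicate m.toNat
                (List.replicate rl.toNat (Char.ofNat (97 + i).toNat)
                  ++ [Char.ofNat (97 + j).toNat])).flatten])
termination_by runs.length
decreasing_by all_goals simp

def repeatLimitedString_alt (s : String) (repeatLimit : Int) : String :=
  let cc := pvHist s
  String.ofList (PySem.Chars.join [] (pvLoopC repeatLimit (pvStackInit cc) []))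

-- ===== PRECONDITION & SPEC =====
-- Pre_ excludes (a) characters whose code is outside 71–122: there Python A raises an
-- IndexError on char_count[ord(char) - 97] (codes 71–96 are accepted by A through Python's
-- negative-index wraparound, and both programs treat them alike); and (b) repeatLimit < 1,
-- outside the problem's natural domain (the task states 1 ≤ repeatLimit), where A's empty
-- string-multiplications produce an accidental value and B's ceiling division is undefined.
def Pre_repeatLimitedString (s : String) (repeatLimit : Int) : Prop :=
  (s.toList.all (fun c => 71 ≤ c.toNat && c.toNat ≤ 122)) = true ∧ 1 ≤ repeatLimit
instance (s : String) (repeatLimit : Int) : Decidable (Pre_repeatLimitedString s repeatLimit) := by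
  unfold Pre_repeatLimitedString; infer_instance

def pvWitness_repeatLimitedString : String × Int := ("a", 1)

def Spec_repeatLimitedString (s : String) (repeatLimit : Int) (out : String) : Prop := out = repeatLimitedString_alt s repeatLimit
instance (s : String) (repeatLimit : Int) (out : String) : Decidable (Spec_repeatLimitedString s repeatLimit out) := by unfold Spec_repeatLimitedString; infer_instance

-- ===== CLAIM (what is proved, stated in full; the proofs are below) =====
def Claim_equal_repeatLimitedString : Prop := ∀ (s : String) (repeatLimit : Int), Dom_repeatLimitedString s repeatLimit → Pre_repeatLimitedString s repeatLimit → Spec_repeatLimitedString s repeatLimit (repeatLimitedString s repeatLimit)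

-- ===== LEMMAS AND PROOFS =====

-- the intermediate one-step-per-block loop: A's loop re-expressed on the run list
-- (proof-only; it is what pv_main relates to pvLoopA and pvLoopC_step unrolls pvLoopC into)
def pvLoopB (rl : Int) : Nat → List (Int × Int) → List (List Char) → List (List Char)
  | 0, _, out => out
  | _ + 1, [], out => out
  | fuel + 1, (i, cnt) :: rest, out =>
    if cnt ≤ rl then
      pvLoopB rl fuel rest (out ++ [List.replicate cnt.toNat (Char.ofNat (97 + i).toNat)])
    else
      let out' := out ++ [List.replicate rl.toNat (Char.ofNat (97 + i).toNat)]
      match rest with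
      | [] => out'
      | (j, jc) :: rest2 =>
        let out'' := out' ++ [[Char.ofNat (97 + j).toNat]]
        let rest' := if 1 < jc then (j, jc - 1) :: rest2 else rest2
        pvLoopB rl fuel ((i, cnt - rl) :: rest') out''

def pvStk (cc : List Int) : Nat → List (Int × Int)
  | 0 => []
  | n + 1 => (if 0 < cc.getD n 0 then [((n : Int), cc.getD n 0)] else []) ++ pvStk cc n

def pvMeasA (cc : List Int) (cur : Int) : Nat := ((cc.take cur.toNat).map Int.toNat).sum * 27 + (cur + 1).toNat + 1
def pvMeasB (st : List (Int × Int)) : Nat := ((st.drop 1).map (fun p => p.2.toNat)).sum * 27 + st.length + 1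

lemma pvSetD_natCast (xs : List Int) (n : Nat) (v : Int) :
    PySem.List.pySetD xs (n : Int) v = xs.set n v := by
  simp only [PySem.List.pySetD, PySem.List.pySet?, PySem.List.pyIdx?]
  split
  · split
    · simp
    · simpa using (List.set_eq_of_length_le (by omega) : xs.set n v = xs).symm
  · omega

lemma pv_getD_pos_lt (cc : List Int) (n : Nat) (h : 0 < cc.getD n 0) : n < cc.length := by
  by_contra hn
  rw [List.getD_eq_default] at h <;> omega

lemma pv_getD_set_ne (cc : List Int) (q k : Nat) (w : Int) (hne : q ≠ k) :
    (cc.set q w).getD k 0 = cc.getD k 0 := by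
  simp [List.getD_eq_getElem?_getD, List.getElem?_set_ne hne]

lemma pv_sum_toNat_set (xs : List Int) (n : Nat) (w : Int) (h : n < xs.length) :
    ((xs.set n w).map Int.toNat).sum + (xs.getD n 0).toNat
      = (xs.map Int.toNat).sum + w.toNat := by
  induction xs generalizing n with
  | nil => simp at h
  | cons a t ih =>
    cases n with
    | zero => simp [List.getD]; omega
    | succ m =>
      simp only [List.set, List.map, List.sum_cons, List.getD_cons_succ]
      have := ih m (by simpa using h)
      omega

lemma pv_sum_take_mono (cc : List Int) (k n : Nat) (h : k ≤ n) :
    ((cc.take k).map Int.toNat).sum ≤ ((cc.take n).map Int.toNat).sum := by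
  have he : cc.take k = (cc.take n).take k := by rw [List.take_take, Nat.min_eq_left h]
  rw [he]
  exact List.Sublist.sum_le_sum (((cc.take n).take_sublist k).map Int.toNat) (by simp)

lemma pv_sum_take_le (cc : List Int) (n : Nat) :
    ((cc.take n).map Int.toNat).sum ≤ (cc.map Int.toNat).sum :=
  List.Sublist.sum_le_sum ((cc.take_sublist n).map Int.toNat) (by simp)

lemma pv_sum_take_set (cc : List Int) (m n : Nat) (w : Int) (hmn : m < n) (hml : m < cc.length) :
    (((cc.set m w).take n).map Int.toNat).sum + (cc.getD m 0).toNat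
      = ((cc.take n).map Int.toNat).sum + w.toNat := by
  rw [List.take_set]
  have hlen : m < (cc.take n).length := by rw [List.length_take]; omega
  have h := pv_sum_toNat_set (cc.take n) m w hlen
  have hg : (cc.take n).getD m 0 = cc.getD m 0 := by
    simp [List.getD_eq_getElem?_getD, List.getElem?_take, hmn]
  rw [hg] at h
  exact h

lemma pv_sum_drop_one_le (t : List (Int × Int)) :
    ((t.drop 1).map (fun p => p.2.toNat)).sum ≤ (t.map (fun p => p.2.toNat)).sum := by
  cases t <;> simp

lemma pv_mem_pvStk (cc : List Int) (n : Nat) (p : Int × Int) (hp : p ∈ pvStk cc n) :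
    ∃ m : Nat, m < n ∧ p = ((m : Int), cc.getD m 0) ∧ 0 < cc.getD m 0 := by
  induction n with
  | zero => simp [pvStk] at hp
  | succ k ih =>
    simp only [pvStk] at hp
    rcases List.mem_append.1 hp with h | h
    · split at h
      · simp only [List.mem_singleton] at h
        exact ⟨k, by omega, h, by assumption⟩
      · simp at h
    · obtain ⟨m, hm, he, hpos⟩ := ih h
      exact ⟨m, by omega, he, hpos⟩

lemma pvStk_set_ge (cc : List Int) (n q : Nat) (w : Int) (h : n ≤ q) :
    pvStk (cc.set q w) n = pvStk cc n := by
  induction n with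
  | zero => rfl
  | succ k ih =>
    simp only [pvStk, ih (by omega), pv_getD_set_ne cc q k w (by omega)]

lemma pvScanA_nil (cc : List Int) (hnn : ∀ x ∈ cc, 0 ≤ x) (n : Nat)
    (h : pvStk cc n = []) : pvScanA cc ((n : Int) - 1) = -1 := by
  induction n with
  | zero => rw [pvScanA]; norm_num
  | succ k ih =>
    simp only [pvStk] at h
    rcases List.append_eq_nil_iff.1 h with ⟨h1, h2⟩
    have hp : ¬ 0 < cc.getD k 0 := by
      intro hp0; rw [if_pos hp0] at h1; simp at h1
    have hz : cc.getD k 0 = 0 := by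
      by_cases hlen : k < cc.length
      · have := hnn (cc.getD k 0) (by
          rw [List.getD_eq_getElem?_getD, List.getElem?_eq_getElem hlen]
          exact List.getElem_mem hlen)
        omega
      · rw [List.getD_eq_default]; omega
    have hcast : ((k + 1 : Nat) : Int) - 1 = ((k : Nat) : Int) := by push_cast; ring
    rw [hcast, pvScanA]
    have hk : ¬ ((k : Int) < 0) := by omega
    simp only [PySem.List.pyGetD_natCast, hz, if_neg hk, if_pos rfl]
    exact ih h2

lemma pvScanA_head (cc : List Int) (hnn : ∀ x ∈ cc, 0 ≤ x) (n : Nat)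
    (j jc : Int) (rest : List (Int × Int)) (h : pvStk cc n = (j, jc) :: rest) :
    pvScanA cc ((n : Int) - 1) = j := by
  induction n with
  | zero => simp [pvStk] at h
  | succ k ih =>
    simp only [pvStk] at h
    have hcast : ((k + 1 : Nat) : Int) - 1 = ((k : Nat) : Int) := by push_cast; ring
    by_cases hp : 0 < cc.getD k 0
    · rw [if_pos hp, List.singleton_append, List.cons.injEq] at h
      obtain ⟨h1, _⟩ := h
      rw [Prod.mk.injEq] at h1
      obtain ⟨e1, _⟩ := h1
      rw [hcast, pvScanA]
      have hk : ¬ ((k : Int) < 0) := by omega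
      rw [if_neg hk, if_neg (by simp only [PySem.List.pyGetD_natCast]; omega)]
      exact e1
    · rw [if_neg hp, List.nil_append] at h
      have hz : cc.getD k 0 = 0 := by
        by_cases hlen : k < cc.length
        · have := hnn (cc.getD k 0) (by
            rw [List.getD_eq_getElem?_getD, List.getElem?_eq_getElem hlen]
            exact List.getElem_mem hlen)
          omega
        · rw [List.getD_eq_default]; omega
      rw [hcast, pvScanA]
      have hk : ¬ ((k : Int) < 0) := by omega
      simp only [if_neg hk, PySem.List.pyGetD_natCast, hz, if_pos rfl]
      exact ih h

lemma pvStk_set_head (cc : List Int) (n : Nat) (j jc : Int) (rest : List (Int × Int))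
    (h : pvStk cc n = (j, jc) :: rest) (w : Int) :
    pvStk (cc.set j.toNat w) n = (if 0 < w then [(j, w)] else []) ++ rest := by
  induction n with
  | zero => simp [pvStk] at h
  | succ k ih =>
    simp only [pvStk] at h ⊢
    by_cases hp : 0 < cc.getD k 0
    · rw [if_pos hp, List.singleton_append, List.cons.injEq] at h
      obtain ⟨h1, h2⟩ := h
      rw [Prod.mk.injEq] at h1
      obtain ⟨hjk, hjc⟩ := h1
      have hkt : j.toNat = k := by omega
      have hlen : k < cc.length := pv_getD_pos_lt cc k hp
      have hgd : (cc.set j.toNat w).getD k 0 = w := by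
        rw [hkt, List.getD_eq_getElem?_getD, List.getElem?_set_self (by omega)]
        simp
      rw [hgd, hkt, pvStk_set_ge cc k k w (le_refl k), h2, ← hjk]
    · rw [if_neg hp, List.nil_append] at h
      have hmk : j.toNat < k := by
        have hmem : (j, jc) ∈ pvStk cc k := h ▸ List.mem_cons_self ..
        obtain ⟨m', hm', he', _⟩ := pv_mem_pvStk cc k _ hmem
        rw [Prod.mk.injEq] at he'
        obtain ⟨e1, _⟩ := he'
        omega
      have hne : j.toNat ≠ k := by omega
      rw [pv_getD_set_ne cc j.toNat k w hne, if_neg hp, List.nil_append]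
      exact ih h

lemma pvStackInit_eq (cc : List Int) : pvStackInit cc = pvStk cc 26 := by
  have key : ∀ m : Nat,
      (((List.range m).filter (fun (i : Nat) => 0 < cc.getD i 0)).map
        (fun (i : Nat) => ((i : Int), cc.getD i 0))).reverse = pvStk cc m := by
    intro m
    induction m with
    | zero => rfl
    | succ k ih =>
      rw [List.range_succ, List.filter_append, List.map_append, List.reverse_append, ih]
      simp only [pvStk, List.filter_cons, List.filter_nil]
      split <;> simp_all
  exact key 26

lemma pv_bump_nonneg (cc : List Int) (i : Int) (h : ∀ x ∈ cc, 0 ≤ x) :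
    ∀ x ∈ pvBump cc i, 0 ≤ x := by
  unfold pvBump
  cases hs : PySem.List.pySet? cc i (PySem.List.pyGetD cc i 0 + 1) with
  | none => exact h
  | some cc' =>
    intro x hx
    simp only [PySem.List.pySet?] at hs
    cases hidx : PySem.List.pyIdx? cc.length i with
    | none => rw [hidx] at hs; simp at hs
    | some k =>
      rw [hidx] at hs
      simp only [Option.map_some, Option.some.injEq] at hs
      subst hs
      rcases List.mem_or_eq_of_mem_set hx with hmem | hval
      · exact h x hmem
      · subst hval
        have : 0 ≤ PySem.List.pyGetD cc i 0 := by
          simp only [PySem.List.pyGetD, PySem.List.pyGet?]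
          cases hidx2 : PySem.List.pyIdx? cc.length i with
          | none => simp
          | some k2 =>
            simp only [Option.bind_some]
            cases hk2 : cc[k2]? with
            | none => simp
            | some v =>
              have hv : v ∈ cc := List.mem_of_getElem? hk2
              simpa using h v hv
        omega

lemma pv_hist_nonneg (s : String) : ∀ x ∈ pvHist s, 0 ≤ x := by
  have key : ∀ (l : List Char) (cc : List Int), (∀ x ∈ cc, 0 ≤ x) →
      ∀ x ∈ l.foldl (fun cc ch => pvBump cc ((ch.toNat : Int) - 97)) cc, 0 ≤ x := by
    intro l
    induction l with
    | nil => intro cc h; simpa using h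
    | cons a t ih =>
      intro cc h
      simp only [List.foldl_cons]
      exact ih _ (pv_bump_nonneg _ _ h)
  exact key s.toList _ (by simp)

lemma pvLoopB_nil (rl : Int) (fb : Nat) (out : List (List Char)) :
    pvLoopB rl fb [] out = out := by
  cases fb <;> rfl

lemma pv_join_nil (out : List (List Char)) : PySem.Chars.join [] out = out.flatten := by
  simp [PySem.Chars.join, List.intercalate]
  induction out with
  | nil => rfl
  | cons a t ih => cases t <;> simp_all [List.intersperse]

lemma pv_main (rl : Int) :
    ∀ fa : Nat, ∀ (cc : List Int) (cur : Int) (fb : Nat) (accA : List Char) (accB : List (List Char)),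
    (∀ x ∈ cc, 0 ≤ x) →
    pvMeasA cc cur ≤ fa →
    pvMeasB (pvStk cc (cur + 1).toNat) ≤ fb →
    accA = accB.flatten →
    pvLoopA rl fa cc cur accA = (pvLoopB rl fb (pvStk cc (cur + 1).toNat) accB).flatten := by
  intro fa
  induction fa using Nat.strong_induction_on with
  | _ fa IH =>
  intro cc cur fb accA accB hnn hma hmb hacc
  cases fa with
  | zero => exfalso; unfold pvMeasA at hma; omega
  | succ fa' =>
  by_cases hcur : cur < 0
  · have h0 : (cur + 1).toNat = 0 := by omega
    rw [pvLoopA, if_pos hcur, h0]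
    show accA = (pvLoopB rl fb (pvStk cc 0) accB).flatten
    rw [show pvStk cc 0 = [] from rfl, pvLoopB_nil]
    exact hacc
  · have hcast : cur = ((cur.toNat : Nat) : Int) := by omega
    set n := cur.toNat with hn
    have hn1 : (cur + 1).toNat = n + 1 := by omega
    rw [hn1] at hmb
    have hgd : PySem.List.pyGetD cc cur 0 = cc.getD n 0 := by
      rw [hcast]; exact PySem.List.pyGetD_natCast ..
    rw [pvLoopA, if_neg hcur]
    simp only [hgd, hn1]
    by_cases hg0 : cc.getD n 0 = 0
    · -- A skips an empty bucket; the stack is unchanged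
      rw [if_pos hg0]
      have hstk : pvStk cc (n + 1) = pvStk cc n := by
        simp only [pvStk, if_neg (show ¬ 0 < cc.getD n 0 from by omega), List.nil_append]
      rw [hstk]
      have hrec := IH fa' (by omega) cc (cur - 1) fb accA accB hnn
        (by
          have hmono := pv_sum_take_mono cc (cur - 1).toNat cur.toNat (by omega)
          unfold pvMeasA at hma ⊢
          simp only [← hn] at hma hmono ⊢
          omega)
        (by rw [show (cur - 1 + 1).toNat = n from by omega, ← hstk]; exact hmb)
        hacc
      rw [show (cur - 1 + 1).toNat = n from by omega] at hrec
      exact hrec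
    · have hgpos : 0 < cc.getD n 0 := by
        rcases Nat.lt_or_ge n cc.length with hlen | hlen
        · have := hnn (cc.getD n 0) (by
            rw [List.getD_eq_getElem?_getD, List.getElem?_eq_getElem hlen]
            exact List.getElem_mem hlen)
          omega
        · exfalso; rw [List.getD_eq_default _ _ hlen] at hg0; omega
      have hlen : n < cc.length := pv_getD_pos_lt cc n hgpos
      rw [if_neg hg0]
      have hstk : pvStk cc (n + 1) = ((n : Int), cc.getD n 0) :: pvStk cc n := by
        simp only [pvStk, if_pos hgpos, List.singleton_append]
      rw [hstk]
      -- B must take a step: its fuel is positive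
      have hmb' := hmb
      rw [hstk] at hmb'
      have hfb1 : 1 ≤ fb := by unfold pvMeasB at hmb'; omega
      obtain ⟨fb', rfl⟩ : ∃ fb', fb = fb' + 1 := ⟨fb - 1, by omega⟩
      by_cases hgle : cc.getD n 0 ≤ rl
      · -- bucket fits entirely
        rw [if_pos hgle, pvLoopB, if_pos hgle]
        have hset : PySem.List.pySetD cc cur 0 = cc.set n 0 := by
          rw [hcast]; exact pvSetD_natCast ..
        rw [hset]
        have hstk2 : pvStk (cc.set n 0) (cur - 1 + 1).toNat = pvStk cc n := by
          rw [show (cur - 1 + 1).toNat = n from by omega]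
          exact pvStk_set_ge cc n n 0 (le_refl n)
        have hsum := pv_sum_toNat_set cc n 0 hlen
        have hrec := IH fa' (by omega) (cc.set n 0) (cur - 1) fb'
          (accA ++ List.replicate (cc.getD n 0).toNat (Char.ofNat (97 + cur).toNat))
          (accB ++ [List.replicate (cc.getD n 0).toNat (Char.ofNat (97 + (n : Int)).toNat)])
          (fun x hx => by
            rcases List.mem_or_eq_of_mem_set hx with hmem | hval
            · exact hnn x hmem
            · omega)
          (by
            have e : (cc.set n 0).take n = cc.take n := by
              rw [List.take_set]
              exact List.set_eq_of_length_le (by rw [List.length_take]; omega)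
            have h1 : (((cc.set n 0).take (cur - 1).toNat).map Int.toNat).sum
                ≤ (((cc.set n 0).take n).map Int.toNat).sum :=
              pv_sum_take_mono _ _ _ (by omega)
            rw [e] at h1
            unfold pvMeasA at hma ⊢
            simp only [← hn] at hma h1 ⊢
            omega)
          (by
            rw [hstk2]
            have hd := pv_sum_drop_one_le (pvStk cc n)
            unfold pvMeasB at hmb' ⊢
            simp only [List.drop_succ_cons, List.drop_zero, List.length_cons] at hmb' ⊢
            omega)
          (by rw [hacc]; rw [hcast]; simp)
        rw [hstk2] at hrec
        rw [hcast] at hrec ⊢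
        exact hrec
      · -- bucket exceeds the limit: emit rl copies, then look for a filler
        rw [if_neg hgle, pvLoopB, if_neg hgle]
        have hset : PySem.List.pySetD cc cur (cc.getD n 0 - rl) = cc.set n (cc.getD n 0 - rl) := by
          rw [hcast]; exact pvSetD_natCast ..
        rw [hset]
        set cc' := cc.set n (cc.getD n 0 - rl) with hcc'
        have hnn' : ∀ x ∈ cc', 0 ≤ x := fun x hx => by
          rcases List.mem_or_eq_of_mem_set hx with hmem | hval
          · exact hnn x hmem
          · omega
        have hstk' : pvStk cc' n = pvStk cc n := pvStk_set_ge cc n n _ (le_refl n)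
        have hsum' := pv_sum_toNat_set cc n (cc.getD n 0 - rl) hlen
        rw [← hcc'] at hsum'
        cases hr : pvStk cc n with
        | nil =>
          -- no filler left: A returns, B breaks
          have hscan : pvScanA cc' ((n : Int) - 1) = -1 :=
            pvScanA_nil cc' hnn' n (by rw [hstk', hr])
          rw [show cur - 1 = (n : Int) - 1 from by omega, hscan, if_pos rfl]
          simp [hacc, hcast]
        | cons p rest2 =>
          obtain ⟨j, jc⟩ := p
          obtain ⟨m, hmlt, hme, hmpos⟩ := pv_mem_pvStk cc n (j, jc) (hr ▸ List.mem_cons_self ..)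
          rw [Prod.mk.injEq] at hme
          obtain ⟨hjm, hjcm⟩ := hme
          subst hjm
          have hscan : pvScanA cc' ((n : Int) - 1) = (m : Int) :=
            pvScanA_head cc' hnn' n (m : Int) jc rest2 (by rw [hstk', hr])
          have hjt : ((m : Int)).toNat = m := Int.toNat_natCast m
          have hscanne : ¬ (pvScanA cc' ((n : Int) - 1) = -1) := by rw [hscan]; omega
          rw [show cur - 1 = (n : Int) - 1 from by omega, if_neg hscanne, hscan]
          -- value of the filler bucket in cc'
          have hjc' : cc'.getD m 0 = jc := by
            rw [hjcm, pv_getD_set_ne cc n m _ (by omega)]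
          have hgdj : PySem.List.pyGetD cc' (m : Int) 0 = jc := by
            rw [PySem.List.pyGetD_natCast]; exact hjc'
          have hsetj : PySem.List.pySetD cc' (m : Int) (PySem.List.pyGetD cc' (m : Int) 0 - 1)
              = cc'.set m (jc - 1) := by
            rw [hgdj, ← hjt, pvSetD_natCast, hjt]
          rw [hsetj]
          set cc'' := cc'.set m (jc - 1) with hcc''
          have hjlen : m < cc'.length := by rw [hcc', List.length_set]; omega
          have hnn'' : ∀ x ∈ cc'', 0 ≤ x := fun x hx => by
            rcases List.mem_or_eq_of_mem_set hx with hmem | hval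
            · exact hnn' x hmem
            · omega
          -- the new stack
          have hstk'' : pvStk cc'' (cur + 1).toNat
              = ((n : Int), cc.getD n 0 - rl) :: ((if 1 < jc then [((m : Int), jc - 1)] else []) ++ rest2) := by
            rw [hn1]
            have hgn : cc''.getD n 0 = cc.getD n 0 - rl := by
              rw [hcc'', pv_getD_set_ne cc' m n _ (by omega), hcc',
                List.getD_eq_getElem?_getD, List.getElem?_set_self hlen]
              simp
            have htail : pvStk cc'' n = (if 0 < jc - 1 then [((m : Int), jc - 1)] else []) ++ rest2 := by
              rw [hcc'', ← hjt]
              exact pvStk_set_head cc' n (m : Int) jc rest2 (by rw [hstk', hr]) (jc - 1)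
            simp only [pvStk, hgn, if_pos (show 0 < cc.getD n 0 - rl from by omega), htail]
            have hiff : (0 < jc - 1) ↔ (1 < jc) := by omega
            simp only [hiff, List.singleton_append]
          -- measures for the recursive call
          have hsumj := pv_sum_toNat_set cc' m (jc - 1) hjlen
          rw [hjc'] at hsumj
          have hmbrec : pvMeasB (pvStk cc'' (cur + 1).toNat) ≤ fb' := by
            rw [hstk'']
            rw [hr] at hmb'
            unfold pvMeasB at hmb' ⊢
            simp only [List.drop_succ_cons, List.drop_zero, List.map_cons, List.sum_cons,
              List.length_cons, List.map_append, List.sum_append, List.length_append] at hmb' ⊢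
            by_cases h1jc : 1 < jc
            · rw [if_pos h1jc]
              simp only [List.map_cons, List.sum_cons, List.length_cons, List.map_nil,
                List.sum_nil, List.length_nil]
              omega
            · rw [if_neg h1jc]
              simp only [List.map_nil, List.sum_nil, List.length_nil, List.nil_append]
              omega
          have hrec := IH fa' (by omega) cc'' cur fb'
            (accA ++ List.replicate rl.toNat (Char.ofNat (97 + cur).toNat) ++ [Char.ofNat (97 + (m : Int)).toNat])
            (accB ++ [List.replicate rl.toNat (Char.ofNat (97 + (n : Int)).toNat)] ++ [[Char.ofNat (97 + (m : Int)).toNat]])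
            hnn''
            (by
              have e1 : cc'.take n = cc.take n := by
                rw [hcc', List.take_set]
                exact List.set_eq_of_length_le (by rw [List.length_take]; omega)
              have e2 := pv_sum_take_set cc' m n (jc - 1) hmlt hjlen
              rw [hjc', e1] at e2
              unfold pvMeasA at hma ⊢
              rw [hcc'']
              simp only [← hn] at hma e2 ⊢
              omega)
            hmbrec
            (by rw [hacc, hcast]; simp)
          rw [hstk''] at hrec
          show _ = (pvLoopB rl fb' (((n : Int), cc.getD n 0 - rl)
              :: (if 1 < jc then ((m : Int), jc - 1) :: rest2 else rest2))
            ((accB ++ [List.replicate rl.toNat (Char.ofNat (97 + (n : Int)).toNat)])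
              ++ [[Char.ofNat (97 + (m : Int)).toNat]])).flatten
          rw [show (if 1 < jc then ((m : Int), jc - 1) :: rest2 else rest2)
              = ((if 1 < jc then [((m : Int), jc - 1)] else []) ++ rest2) from by split <;> simp]
          rw [hcast] at hrec ⊢
          exact hrec

-- ===== bridge pvLoopB (one block per step) = pvLoopC (batched) =====

lemma C_nil (rl : Int) (out : List (List Char)) : pvLoopC rl [] out = out := by
  rw [pvLoopC.eq_def]

lemma C_le (rl i n : Int) (rest : List (Int × Int)) (out : List (List Char)) (h : n ≤ rl) :
    pvLoopC rl ((i, n) :: rest) out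
      = pvLoopC rl rest (out ++ [List.replicate n.toNat (Char.ofNat (97 + i).toNat)]) := by
  rw [pvLoopC.eq_def]; simp only [if_pos h]

lemma C_one (rl i n : Int) (out : List (List Char)) (h : ¬ n ≤ rl) :
    pvLoopC rl [(i, n)] out = out ++ [List.replicate rl.toNat (Char.ofNat (97 + i).toNat)] := by
  rw [pvLoopC.eq_def]; simp only [if_neg h]

lemma C_gt (rl i n j m : Int) (rest2 : List (Int × Int)) (out : List (List Char)) (h : ¬ n ≤ rl)
    (h2 : -(PySem.Int.floordiv (-n) rl) - 1 < m) :
    pvLoopC rl ((i, n) :: (j, m) :: rest2) out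
      = pvLoopC rl ((j, m - (-(PySem.Int.floordiv (-n) rl) - 1)) :: rest2)
          (out ++ [(List.replicate (-(PySem.Int.floordiv (-n) rl) - 1).toNat
              (List.replicate rl.toNat (Char.ofNat (97 + i).toNat)
                ++ [Char.ofNat (97 + j).toNat])).flatten
            ++ List.replicate (n - (-(PySem.Int.floordiv (-n) rl) - 1) * rl).toNat (Char.ofNat (97 + i).toNat)]) := by
  rw [pvLoopC.eq_def]; simp only [if_neg h, if_pos h2]

lemma C_le2 (rl i n j m : Int) (rest2 : List (Int × Int)) (out : List (List Char)) (h : ¬ n ≤ rl)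
    (h2 : ¬ (-(PySem.Int.floordiv (-n) rl) - 1 < m)) :
    pvLoopC rl ((i, n) :: (j, m) :: rest2) out
      = pvLoopC rl ((i, n - m * rl) :: rest2)
          (out ++ [(List.replicate m.toNat
              (List.replicate rl.toNat (Char.ofNat (97 + i).toNat)
                ++ [Char.ofNat (97 + j).toNat])).flatten]) := by
  rw [pvLoopC.eq_def]; simp only [if_neg h, if_neg h2]

lemma pvLoopC_out (rl : Int) : ∀ (k : Nat) (st : List (Int × Int)), st.length ≤ k →
    ∀ (o1 o2 : List (List Char)), pvLoopC rl st (o1 ++ o2) = o1 ++ pvLoopC rl st o2 := by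
  intro k
  induction k with
  | zero =>
    intro st hk o1 o2
    have hst : st = [] := by cases st <;> simp_all
    subst hst
    rw [C_nil, C_nil]
  | succ k ih =>
    intro st hk o1 o2
    match st with
    | [] => rw [C_nil, C_nil]
    | (i, n) :: rest =>
      by_cases hle : n ≤ rl
      · rw [C_le rl i n rest _ hle, C_le rl i n rest _ hle, List.append_assoc,
          ih rest (by simpa using hk)]
      · match rest with
        | [] => rw [C_one rl i n _ hle, C_one rl i n _ hle, List.append_assoc]
        | (j, m) :: rest2 =>
          by_cases h2 : -(PySem.Int.floordiv (-n) rl) - 1 < m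
          · rw [C_gt rl i n j m rest2 _ hle h2, C_gt rl i n j m rest2 _ hle h2,
              List.append_assoc, ih _ (by simpa using hk)]
          · rw [C_le2 rl i n j m rest2 _ hle h2, C_le2 rl i n j m rest2 _ hle h2,
              List.append_assoc, ih _ (by simpa using hk)]

lemma pv_flat_out (rl : Int) (st : List (Int × Int)) (out : List (List Char)) :
    (pvLoopC rl st out).flatten = out.flatten ++ (pvLoopC rl st []).flatten := by
  have h := pvLoopC_out rl st.length st (le_refl _) out []
  rw [List.append_nil] at h
  rw [h, List.flatten_append]

lemma pv_need_bounds (rl n : Int) (hrl : 1 ≤ rl) (hn : rl < n) :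
    1 ≤ -(PySem.Int.floordiv (-n) rl) - 1 ∧
    (-(PySem.Int.floordiv (-n) rl) - 1) * rl < n ∧
    n ≤ (-(PySem.Int.floordiv (-n) rl)) * rl := by
  have hb : (0:Int) < rl := by omega
  have h := (PySem.Int.neg_floordiv_neg_eq_iff_of_pos (a := n) (b := rl)
      (q := -(PySem.Int.floordiv (-n) rl)) hb).mp rfl
  obtain ⟨h1, h2⟩ := h
  refine ⟨?_, h1, h2⟩
  by_contra hc
  push_neg at hc
  have hq : -(PySem.Int.floordiv (-n) rl) ≤ 1 := by omega
  nlinarith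

lemma pv_need_pred (rl n : Int) (hrl : 1 ≤ rl) (hn : rl < n - rl) :
    -(PySem.Int.floordiv (-(n - rl)) rl) - 1 = -(PySem.Int.floordiv (-n) rl) - 2 := by
  have hb : (0:Int) < rl := by omega
  obtain ⟨hg1, hlt, hle⟩ := pv_need_bounds rl n hrl (by omega)
  have := (PySem.Int.neg_floordiv_neg_eq_iff_of_pos (a := n - rl) (b := rl)
      (q := -(PySem.Int.floordiv (-n) rl) - 1) hb).mpr ⟨by nlinarith, by nlinarith⟩
  omega

lemma pv_flat_one (rl : Int) (st : List (Int × Int)) (c : List Char) :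
    (pvLoopC rl st [c]).flatten = c ++ (pvLoopC rl st []).flatten := by
  rw [pv_flat_out]; simp


lemma pvLoopC_unroll (rl i n j m : Int) (rest2 : List (Int × Int))
    (hrl : 1 ≤ rl) (hn : rl < n) (hm : 1 ≤ m) :
    (pvLoopC rl ((i, n) :: (j, m) :: rest2) []).flatten
      = List.replicate rl.toNat (Char.ofNat (97 + i).toNat) ++ [Char.ofNat (97 + j).toNat]
        ++ (pvLoopC rl ((i, n - rl) :: (if 1 < m then (j, m - 1) :: rest2 else rest2)) []).flatten := by
  have hnle : ¬ n ≤ rl := by omega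
  obtain ⟨hg1, hlt, hle⟩ := pv_need_bounds rl n hrl hn
  set need := -(PySem.Int.floordiv (-n) rl) - 1 with hneed
  by_cases hm1 : 1 < m
  · rw [if_pos hm1]
    by_cases hcase : need < m
    · -- m > need: the whole run of i is emitted in one batch
      rw [C_gt rl i n j m rest2 [] hnle (hneed ▸ hcase)]
      rw [← hneed]
      by_cases hsmall : n - rl ≤ rl
      · -- need = 1
        have h1 : need = 1 := by nlinarith
        rw [C_le rl i (n - rl) _ [] hsmall]
        rw [pv_flat_out, pv_flat_out, h1]
        have he : n - 1 * rl = n - rl := by ring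
        simp [pv_flat_one, he]
      · -- need ≥ 2: peel one block+separator from the batch
        have hpred := pv_need_pred rl n hrl (by omega)
        have hpred' : -(PySem.Int.floordiv (-(n - rl)) rl) - 1 = need - 1 := by
          rw [hpred, hneed]; ring
        rw [C_gt rl i (n - rl) j (m - 1) rest2 [] (by omega)
          (by rw [hpred']; omega)]
        rw [hpred']
        rw [pv_flat_out, pv_flat_out]
        have he1 : m - 1 - (need - 1) = m - need := by ring
        have he2 : n - rl - (need - 1) * rl = n - need * rl := by ring
        have he3 : need.toNat = (need - 1).toNat + 1 := by omega
        rw [he1, he2, he3, List.replicate_succ]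
        simp [pv_flat_one, List.append_assoc]
    · -- m ≤ need: the batch is bounded by m separators
      rw [C_le2 rl i n j m rest2 [] hnle (hneed ▸ hcase)]
      have hmn : 2 ≤ need := by omega
      have hbig : ¬ (n - rl ≤ rl) := by nlinarith
      have hpred := pv_need_pred rl n hrl (by omega)
      have hpred' : -(PySem.Int.floordiv (-(n - rl)) rl) - 1 = need - 1 := by
        rw [hpred, hneed]; ring
      rw [C_le2 rl i (n - rl) j (m - 1) rest2 [] hbig (by rw [hpred']; omega)]
      rw [pv_flat_out, pv_flat_out]
      have he1 : n - rl - (m - 1) * rl = n - m * rl := by ring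
      have he2 : m.toNat = (m - 1).toNat + 1 := by omega
      rw [he1, he2, List.replicate_succ]
      simp [pv_flat_one, List.append_assoc]
  · -- m = 1: the filler run disappears
    have hm' : m = 1 := by omega
    rw [if_neg hm1]
    have hcase : ¬ (need < m) := by omega
    rw [C_le2 rl i n j m rest2 [] hnle (hneed ▸ hcase)]
    rw [pv_flat_out]
    have he : n - m * rl = n - rl := by rw [hm']; ring
    rw [he, hm']
    simp [pv_flat_one]

lemma pv_bridge (rl : Int) (hrl : 1 ≤ rl) :
    ∀ (fuel : Nat) (st : List (Int × Int)) (out : List (List Char)),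
    (∀ p ∈ st, 0 < p.2) → pvMeasB st ≤ fuel →
    (pvLoopB rl fuel st out).flatten = (pvLoopC rl st out).flatten := by
  intro fuel
  induction fuel using Nat.strong_induction_on with
  | _ fuel IH =>
  intro st out hpos hmeas
  cases fuel with
  | zero => exfalso; unfold pvMeasB at hmeas; omega
  | succ f =>
  cases st with
  | nil => rw [pvLoopB, C_nil]
  | cons p rest =>
  obtain ⟨i, cnt⟩ := p
  by_cases hle : cnt ≤ rl
  · rw [pvLoopB, if_pos hle, C_le rl i cnt rest out hle]
    refine IH f (by omega) rest _ (fun q hq => hpos q (List.mem_cons_of_mem _ hq)) ?_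
    have h1 := pv_sum_drop_one_le rest
    unfold pvMeasB at hmeas ⊢
    simp only [List.drop_succ_cons, List.drop_zero, List.length_cons] at hmeas ⊢
    omega
  · rw [pvLoopB, if_neg hle]
    cases rest with
    | nil => rw [C_one rl i cnt out hle]
    | cons q rest2 =>
    obtain ⟨j, jc⟩ := q
    have hjc : 0 < jc := hpos (j, jc) (by simp)
    have hrec := IH f (by omega)
      ((i, cnt - rl) :: (if 1 < jc then (j, jc - 1) :: rest2 else rest2))
      (out ++ [List.replicate rl.toNat (Char.ofNat (97 + i).toNat)] ++ [[Char.ofNat (97 + j).toNat]])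
      (by
        intro q hq
        rcases List.mem_cons.1 hq with hq1 | hq2
        · rw [hq1]; simp; omega
        · by_cases h1jc : 1 < jc
          · rw [if_pos h1jc] at hq2
            rcases List.mem_cons.1 hq2 with hq3 | hq4
            · rw [hq3]; simp; omega
            · exact hpos q (by simp [hq4])
          · rw [if_neg h1jc] at hq2
            exact hpos q (by simp [hq2]))
      (by
        have ha : 1 ≤ jc.toNat := by omega
        unfold pvMeasB at hmeas ⊢
        by_cases h1jc : 1 < jc
        · rw [if_pos h1jc]
          simp only [List.drop_succ_cons, List.drop_zero, List.map_cons, List.sum_cons,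
            List.length_cons] at hmeas ⊢
          have hb : (jc - 1).toNat = jc.toNat - 1 := by omega
          rw [hb]
          omega
        · rw [if_neg h1jc]
          have hb : jc = 1 := by omega
          subst hb
          simp only [List.drop_succ_cons, List.drop_zero, List.map_cons, List.sum_cons,
            List.length_cons] at hmeas ⊢
          have h2 := pv_sum_drop_one_le rest2
          omega)
    rw [hrec]
    rw [pv_flat_out rl _ (out ++ _ ++ _), pv_flat_out rl _ out,
      pvLoopC_unroll rl i cnt j jc rest2 hrl (by omega) (by omega)]
    simp [List.append_assoc]

-- ===== VERDICT (by name: the statement is the Claim_ definition above) =====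
theorem repeatLimitedString_spec : Claim_equal_repeatLimitedString := by
  intro s rl _hdom hpre
  unfold Spec_repeatLimitedString
  simp only [repeatLimitedString, repeatLimitedString_alt]
  rw [pvStackInit_eq, pv_join_nil]
  have h := pv_main rl (((pvHist s).map Int.toNat).sum * 27 + 27) (pvHist s) 25
      (pvMeasB (pvStk (pvHist s) 26)) [] [] (pv_hist_nonneg s)
      (by
        have h25 := pv_sum_take_le (pvHist s) ((25 : Int)).toNat
        unfold pvMeasA
        omega)
      (le_of_eq (by rw [show ((25 : Int) + 1).toNat = 26 from rfl]))
      rfl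
  rw [show ((25 : Int) + 1).toNat = 26 from rfl] at h
  rw [h]
  exact congrArg String.ofList (pv_bridge rl hpre.2 _ _ []
    (fun p hp => by
      obtain ⟨m, _, hpe, hpos⟩ := pv_mem_pvStk _ _ p hp
      rw [hpe]; exact hpos)
    (le_refl _))
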